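-- pv_equiv track=rewrite | github.com/sergeylobachev/leetcode | Contests/Biweekly Contest 136/3.py | solution
-- ===== SOURCE A (Python) =====
-- def solution(grid):
--     R = len(grid)
--     C = len(grid[0])
--
--     ans = 0
--
--     for x in range(R//2):
--         for y in range(C//2):
--             a = grid[x][y]
--             b = grid[x][~y]
--             c = grid[~x][y]
--             d = grid[~x][~y]
--             s = a + b + c + d
--             if s == 1 or s == 3:
--                 ans += 1
--             if s == 2:
--                 ans += 2
--
--     ones = 0
--     p = 0
--     if R % 2:
--         for i in range(C//2):
--             if grid[R//2][i] == 0 and grid[R//2][~i] == 1: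
--                 p += 1
--                 ans += 1
--
--             if grid[R//2][i] == 1 and grid[R//2][~i] == 0:
--                 p += 1
--                 ans += 1
--
--             if grid[R//2][i] == 1 and grid[R//2][~i] == 1:
--                 ones += 2
--
--     if C % 2:
--         for i in range(R//2):
--             if grid[i][C//2] == 0 and grid[~i][C//2] == 1:
--                 p += 1
--                 ans += 1
--
--             if grid[i][C//2] == 1 and grid[~i][C//2] == 0:
--                 p += 1
--                 ans += 1
--
--             if grid[i][C//2] == 1 and grid[~i][C//2] == 1:
--                 ones += 2
--
--     if R % 2 == 1 and C % 2 == 1: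
--         # ones += grid[R//2][C//2]
--         ans += 1
--
--     ones = ones % 4
--
--     if ones == 2 and p == 0:
--         ans += 2
--
--     return ans
-- ===== SOURCE B (Python) =====
-- def solution(grid):
--     R = len(grid)
--     C = len(grid[0])
--     # group every cell value by its symmetry orbit: one grouping pass over the rows
--     orbits = {}
--     for x in range(R):
--         row = grid[x]
--         i = min(x, R - 1 - x)
--         for y in range(C // 2):
--             k = (i, y)
--             orbits[k] = orbits.get(k, []) + [row[y], row[~y]]
--         if C % 2:
--             k = (i, C // 2)
--             orbits[k] = orbits.get(k, []) + [row[C // 2]]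
--     ans = 0
--     ones = 0
--     p = 0
--     for vals in orbits.values():
--         n = len(vals)
--         if n == 4:
--             s = sum(vals)
--             if s == 2:
--                 ans += 2
--             elif s == 1 or s == 3:
--                 ans += 1
--         elif n == 2:
--             a, b = vals
--             if (a == 0 and b == 1) or (a == 1 and b == 0):
--                 p += 1
--                 ans += 1
--             elif a == 1 and b == 1:
--                 ones += 2
--         else:
--             ans += 1
--     if ones % 4 == 2 and p == 0:
--         ans += 2
--     return ans
-- ===== Notes on version B (the rewrite author's own statement) =====
-- stated objective: alternative
-- what changed: Replaces A's three separate mirror-index loops (quad double loop over half the grid, then a middle-row loop, then a middle-column loop) by a dict that groups every cell value into its symmetry orbit in one grouping pass over the rows, followed by a pass over the orbit value-lists that classifies each orbit purely by its size (4 = quad, 2 = mirror pair, 1 = center).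
-- outside the precondition, e.g. on solution([[1, 0, 1], [1], [0, 1, 1]]): A returns 3, B raises IndexError
import Mathlib
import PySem

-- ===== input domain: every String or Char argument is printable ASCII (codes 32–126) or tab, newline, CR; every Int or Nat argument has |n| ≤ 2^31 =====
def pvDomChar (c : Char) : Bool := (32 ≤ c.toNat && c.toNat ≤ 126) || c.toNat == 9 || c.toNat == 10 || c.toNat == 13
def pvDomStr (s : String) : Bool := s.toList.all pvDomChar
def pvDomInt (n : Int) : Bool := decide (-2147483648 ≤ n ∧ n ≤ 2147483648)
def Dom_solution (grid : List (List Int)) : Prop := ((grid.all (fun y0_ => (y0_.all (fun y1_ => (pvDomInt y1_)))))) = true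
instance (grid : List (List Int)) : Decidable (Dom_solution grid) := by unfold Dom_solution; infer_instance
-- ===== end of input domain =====

-- B replaces A's mirror-index loops (quads over half the grid, then separate middle-row and
-- middle-column loops) by a dict grouping every cell into its symmetry orbit in one pass over all
-- cells, then a pass over the orbit value-lists classified by size; objective: alternative.

-- ===== PORT A =====
-- body of A's nested quad loop (grid[x][y], grid[x][~y], grid[~x][y], grid[~x][~y])
def pvA_quad (grid : List (List Int)) (ans x y : Int) : Int :=
  let a := PySem.List.pyGetD (PySem.List.pyGetD grid x []) y 0
  let b := PySem.List.pyGetD (PySem.List.pyGetD grid x []) (-y - 1) 0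
  let c := PySem.List.pyGetD (PySem.List.pyGetD grid (-x - 1) []) y 0
  let d := PySem.List.pyGetD (PySem.List.pyGetD grid (-x - 1) []) (-y - 1) 0
  let s := a + b + c + d
  let ans := if s = 1 ∨ s = 3 then ans + 1 else ans
  if s = 2 then ans + 2 else ans

-- body of A's middle-row loop; state (ans, ones, p)
def pvA_midrow (grid : List (List Int)) (R : Int) (st : Int × Int × Int) (i : Int) : Int × Int × Int :=
  let mid := PySem.List.pyGetD grid (PySem.Int.floordiv R 2) []
  let st := if PySem.List.pyGetD mid i 0 = 0 ∧ PySem.List.pyGetD mid (-i - 1) 0 = 1 then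
      (st.1 + 1, st.2.1, st.2.2 + 1) else st
  let st := if PySem.List.pyGetD mid i 0 = 1 ∧ PySem.List.pyGetD mid (-i - 1) 0 = 0 then
      (st.1 + 1, st.2.1, st.2.2 + 1) else st
  if PySem.List.pyGetD mid i 0 = 1 ∧ PySem.List.pyGetD mid (-i - 1) 0 = 1 then
      (st.1, st.2.1 + 2, st.2.2) else st

-- body of A's middle-column loop; state (ans, ones, p)
def pvA_midcol (grid : List (List Int)) (C : Int) (st : Int × Int × Int) (i : Int) : Int × Int × Int :=
  let a := PySem.List.pyGetD (PySem.List.pyGetD grid i []) (PySem.Int.floordiv C 2) 0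
  let b := PySem.List.pyGetD (PySem.List.pyGetD grid (-i - 1) []) (PySem.Int.floordiv C 2) 0
  let st := if a = 0 ∧ b = 1 then (st.1 + 1, st.2.1, st.2.2 + 1) else st
  let st := if a = 1 ∧ b = 0 then (st.1 + 1, st.2.1, st.2.2 + 1) else st
  if a = 1 ∧ b = 1 then (st.1, st.2.1 + 2, st.2.2) else st

def solution (grid : List (List Int)) : Int :=
  let R : Int := grid.length
  let C : Int := ((PySem.List.pyGetD grid 0 []).length : Int)
  let ans : Int :=
    (PySem.List.pyRange 0 (PySem.Int.floordiv R 2) 1).foldl (fun ans x =>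
      (PySem.List.pyRange 0 (PySem.Int.floordiv C 2) 1).foldl
        (fun ans y => pvA_quad grid ans x y) ans) 0
  let st1 : Int × Int × Int :=
    if PySem.Int.mod R 2 ≠ 0 then
      (PySem.List.pyRange 0 (PySem.Int.floordiv C 2) 1).foldl (pvA_midrow grid R) (ans, 0, 0)
    else (ans, 0, 0)
  let st2 : Int × Int × Int :=
    if PySem.Int.mod C 2 ≠ 0 then
      (PySem.List.pyRange 0 (PySem.Int.floordiv R 2) 1).foldl (pvA_midcol grid C) st1
    else st1
  let ans2 := if PySem.Int.mod R 2 = 1 ∧ PySem.Int.mod C 2 = 1 then st2.1 + 1 else st2.1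
  let ones := PySem.Int.mod st2.2.1 4
  if ones = 2 ∧ st2.2.2 = 0 then ans2 + 2 else ans2

-- ===== PORT B =====
-- B's grouping pass: per row, orbits[k] = orbits.get(k, []) + [row[y], row[~y]] for the left
-- half, plus the middle column cell when C is odd
def pvB_build (grid : List (List Int)) (R C : Int) : PySem.Dict (Int × Int) (List Int) :=
  (PySem.List.pyRange 0 R 1).foldl (fun d x =>
    let row := PySem.List.pyGetD grid x []
    let i := min x (R - 1 - x)
    let d := (PySem.List.pyRange 0 (PySem.Int.floordiv C 2) 1).foldl (fun d y =>
      d.modify (i, y) []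
        (· ++ [PySem.List.pyGetD row y 0, PySem.List.pyGetD row (-y - 1) 0])) d
    if PySem.Int.mod C 2 ≠ 0 then
      d.modify (i, PySem.Int.floordiv C 2) []
        (· ++ [PySem.List.pyGetD row (PySem.Int.floordiv C 2) 0])
    else d)
    PySem.Dict.empty

-- B's loop body over one orbit value-list; state (ans, ones, p)
def pvB_step (st : Int × Int × Int) (vals : List Int) : Int × Int × Int :=
  let n : Int := vals.length
  if n = 4 then
    let s := vals.sum
    if s = 2 then (st.1 + 2, st.2.1, st.2.2)
    else if s = 1 ∨ s = 3 then (st.1 + 1, st.2.1, st.2.2)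
    else st
  else if n = 2 then
    let a := PySem.List.pyGetD vals 0 0   -- a, b = vals (reached only for length-2 lists)
    let b := PySem.List.pyGetD vals 1 0
    if (a = 0 ∧ b = 1) ∨ (a = 1 ∧ b = 0) then (st.1 + 1, st.2.1, st.2.2 + 1)
    else if a = 1 ∧ b = 1 then (st.1, st.2.1 + 2, st.2.2)
    else st
  else (st.1 + 1, st.2.1, st.2.2)

def solution_alt (grid : List (List Int)) : Int :=
  let R : Int := grid.length
  let C : Int := ((PySem.List.pyGetD grid 0 []).length : Int)
  let orbits := pvB_build grid R C
  let st := orbits.values.foldl pvB_step (0, 0, 0)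
  if PySem.Int.mod st.2.1 4 = 2 ∧ st.2.2 = 0 then st.1 + 2 else st.1

-- ===== PRECONDITION & SPEC =====
-- Pre_ excludes the empty grid (A raises IndexError on grid[0]) and grids with a row shorter
-- than ⌈C/2⌉ mirror positions: there A in general raises IndexError itself, except that on an
-- odd-width middle row of exactly C//2 cells A still returns while B also reads the center cell
-- and raises.
def Pre_solution (grid : List (List Int)) : Prop :=
  grid ≠ [] ∧ ∀ row ∈ grid, ((grid.headD []).length + 1) / 2 ≤ row.length
instance (grid : List (List Int)) : Decidable (Pre_solution grid) := by
  unfold Pre_solution; infer_instance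
def pvWitness_solution : List (List Int) := [[1, 0], [0, 1]]

def Spec_solution (grid : List (List Int)) (out : Int) : Prop := out = solution_alt grid
instance (grid : List (List Int)) (out : Int) : Decidable (Spec_solution grid out) := by unfold Spec_solution; infer_instance

-- ===== CLAIM (what is proved, stated in full; the proofs are below) =====
def Claim_equal_solution : Prop := ∀ (grid : List (List Int)), Dom_solution grid → Pre_solution grid → Spec_solution grid (solution grid)

-- ===== LEMMAS AND PROOFS =====

-- canonical (Nat-indexed) view of the grid
def pvM (grid : List (List Int)) : ℕ := (grid.headD []).length
def pvG (grid : List (List Int)) (i j : ℕ) : Int := ((grid.getD i []).getD j 0)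
-- the cell Python reads at row i, index ~j (j-th from the right of that row)
def pvGr (grid : List (List Int)) (i j : ℕ) : Int :=
  ((grid.getD i []).getD ((grid.getD i []).length - 1 - j) 0)

-- contribution of one quad with cell sum s (value A's two sequential ifs add)
def pvAq (s : Int) : Int := (if s = 1 ∨ s = 3 then 1 else 0) + (if s = 2 then 2 else 0)
-- contributions of one mirror pair (a, b): to ans and to p, and to ones
def pvPa (a b : Int) : Int := if (a = 0 ∧ b = 1) ∨ (a = 1 ∧ b = 0) then 1 else 0
def pvPo (a b : Int) : Int := if a = 1 ∧ b = 1 then 2 else 0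

def pvS (grid : List (List Int)) (x y : ℕ) : Int :=
  pvG grid x y + pvGr grid x y +
  pvG grid (grid.length - 1 - x) y + pvGr grid (grid.length - 1 - x) y

-- quad contribution of row pair x
def pvRowQ (grid : List (List Int)) (x : ℕ) : Int :=
  ((List.range (pvM grid / 2)).map (fun y => pvAq (pvS grid x y))).sum
-- middle-column pair contributions at row pair i
def pvMCpa (grid : List (List Int)) (i : ℕ) : Int :=
  if pvM grid % 2 = 1 then
    pvPa (pvG grid i (pvM grid / 2)) (pvG grid (grid.length - 1 - i) (pvM grid / 2)) else 0
def pvMCpo (grid : List (List Int)) (i : ℕ) : Int :=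
  if pvM grid % 2 = 1 then
    pvPo (pvG grid i (pvM grid / 2)) (pvG grid (grid.length - 1 - i) (pvM grid / 2)) else 0
-- mirror-pair contributions inside row i
def pvMira (grid : List (List Int)) (i : ℕ) : Int :=
  ((List.range (pvM grid / 2)).map (fun y =>
    pvPa (pvG grid i y) (pvGr grid i y))).sum
def pvMiro (grid : List (List Int)) (i : ℕ) : Int :=
  ((List.range (pvM grid / 2)).map (fun y =>
    pvPo (pvG grid i y) (pvGr grid i y))).sum

def pvQsum (grid : List (List Int)) : Int :=
  ((List.range (grid.length / 2)).map (pvRowQ grid)).sum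
def pvMRa (grid : List (List Int)) : Int :=
  if grid.length % 2 = 1 then pvMira grid (grid.length / 2) else 0
def pvMRo (grid : List (List Int)) : Int :=
  if grid.length % 2 = 1 then pvMiro grid (grid.length / 2) else 0
def pvMCa (grid : List (List Int)) : Int :=
  ((List.range (grid.length / 2)).map (pvMCpa grid)).sum
def pvMCo (grid : List (List Int)) : Int :=
  ((List.range (grid.length / 2)).map (pvMCpo grid)).sum

def pvCanon (grid : List (List Int)) : Int :=
  let ans := pvQsum grid + pvMRa grid + pvMCa grid +
    (if grid.length % 2 = 1 ∧ pvM grid % 2 = 1 then 1 else 0)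
  if PySem.Int.mod (pvMRo grid + pvMCo grid) 4 = 2 ∧ pvMRa grid + pvMCa grid = 0 then ans + 2
  else ans

-- per-row-pair totals of B's sweep (quad rows vs the middle row)
def pvTBa (grid : List (List Int)) (i : ℕ) : Int :=
  if 2 * i + 1 < grid.length then pvRowQ grid i + pvMCpa grid i
  else pvMira grid i + (if pvM grid % 2 = 1 then 1 else 0)
def pvTBo (grid : List (List Int)) (i : ℕ) : Int :=
  if 2 * i + 1 < grid.length then pvMCpo grid i else pvMiro grid i
def pvTBp (grid : List (List Int)) (i : ℕ) : Int :=
  if 2 * i + 1 < grid.length then pvMCpa grid i else pvMira grid i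

-- generic fold-to-sum lemmas
lemma pvFoldAdd {α : Type} (xs : List α) (step : Int → α → Int) (f : α → Int)
    (h : ∀ a x, x ∈ xs → step a x = a + f x) (a : Int) :
    xs.foldl step a = a + (xs.map f).sum := by
  induction xs generalizing a with
  | nil => simp
  | cons x xs ih =>
    simp only [List.foldl_cons, List.map_cons, List.sum_cons]
    rw [h a x (by simp), ih (fun a y hy => h a y (by simp [hy]))]
    ring

lemma pvFoldAdd3 {α : Type} (xs : List α) (step : Int × Int × Int → α → Int × Int × Int)
    (f g h : α → Int)
    (hs : ∀ s x, x ∈ xs → step s x = (s.1 + f x, s.2.1 + g x, s.2.2 + h x))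
    (s : Int × Int × Int) :
    xs.foldl step s = (s.1 + (xs.map f).sum, s.2.1 + (xs.map g).sum, s.2.2 + (xs.map h).sum) := by
  induction xs generalizing s with
  | nil => simp
  | cons x xs ih =>
    simp only [List.foldl_cons, List.map_cons, List.sum_cons]
    rw [hs s x (by simp), ih (fun s y hy => hs s y (by simp [hy]))]
    simp only [Prod.mk.injEq]
    refine ⟨by ring, by ring, by ring⟩

lemma pvRange_natCast (q : ℕ) :
    PySem.List.pyRange 0 (q : Int) 1 = (List.range q).map (fun k : ℕ => (k : Int)) := by
  rw [PySem.List.pyRange_one]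
  simp

lemma pvFloorDiv2 (k : ℕ) : PySem.Int.floordiv (k : Int) 2 = ((k / 2 : ℕ) : Int) := by
  exact_mod_cast PySem.Int.floordiv_natCast k 2

lemma pvMod2 (k : ℕ) : PySem.Int.mod (k : Int) 2 = ((k % 2 : ℕ) : Int) := by
  exact_mod_cast PySem.Int.mod_natCast k 2

lemma pvGetD0 (grid : List (List Int)) :
    PySem.List.pyGetD grid 0 ([] : List Int) = grid.headD [] := by
  cases grid with
  | nil => simp [PySem.List.pyGetD_zero]
  | cons r t => simp [PySem.List.pyGetD_zero]

-- negative index: xs[-(j+1)] = xs[len-1-j]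
lemma pvGetNeg (xs : List Int) (j : ℕ) (hj : j < xs.length) :
    PySem.List.pyGetD xs (-(j : Int) - 1) 0 = xs.getD (xs.length - 1 - j) 0 := by
  have h1 : (-(j : Int) - 1) = -((j + 1 : ℕ) : Int) := by push_cast; ring
  rw [h1, PySem.List.pyGetD_neg_natCast xs (j + 1) 0 (by omega) (by omega)]
  rw [List.getD_eq_getElem xs 0 (by omega)]
  congr 1
  omega

lemma pvGetNeg_row (grid : List (List Int)) (j : ℕ) (hj : j < grid.length) :
    PySem.List.pyGetD grid (-(j : Int) - 1) [] = grid.getD (grid.length - 1 - j) [] := by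
  have h1 : (-(j : Int) - 1) = -((j + 1 : ℕ) : Int) := by push_cast; ring
  rw [h1, PySem.List.pyGetD_neg_natCast grid (j + 1) [] (by omega) (by omega)]
  rw [List.getD_eq_getElem grid [] (by omega)]
  congr 1
  omega

-- the row-length bound Pre_ gives for every real row
lemma pvPreLen (grid : List (List Int)) (hp : Pre_solution grid) :
    ∀ j, j < grid.length → (pvM grid + 1) / 2 ≤ (grid.getD j []).length := by
  intro j hj
  have hm : grid.getD j [] ∈ grid := by
    rw [List.getD_eq_getElem grid [] hj]
    exact List.getElem_mem hj
  exact hp.2 _ hm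

-- pointwise characterisation of A's loop bodies
lemma pvA_quad_eq (grid : List (List Int)) (x y : ℕ) (hx : x < grid.length / 2)
    (h1 : pvM grid / 2 ≤ (grid.getD x []).length)
    (h2 : pvM grid / 2 ≤ (grid.getD (grid.length - 1 - x) []).length)
    (hy : y < pvM grid / 2) (ans : Int) :
    pvA_quad grid ans (↑x) (↑y) = ans + pvAq (pvS grid x y) := by
  have hxn : x < grid.length := by omega
  simp only [pvA_quad, PySem.List.pyGetD_natCast, pvGetNeg_row grid x hxn]
  rw [pvGetNeg _ y (by omega), pvGetNeg _ y (by omega)]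
  simp only [pvAq, pvS, pvG, pvGr]
  split_ifs <;> omega

lemma solA_mr (grid : List (List Int)) (hodd : grid.length % 2 = 1)
    (hl : pvM grid / 2 ≤ (grid.getD (grid.length / 2) []).length)
    (st : Int × Int × Int) (i : ℕ) (hi : i < pvM grid / 2) :
    pvA_midrow grid (↑grid.length) st (↑i) =
      (st.1 + pvPa (pvG grid (grid.length / 2) i) (pvGr grid (grid.length / 2) i),
       st.2.1 + pvPo (pvG grid (grid.length / 2) i) (pvGr grid (grid.length / 2) i),
       st.2.2 + pvPa (pvG grid (grid.length / 2) i) (pvGr grid (grid.length / 2) i)) := by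
  simp only [pvA_midrow, pvFloorDiv2, PySem.List.pyGetD_natCast]
  rw [pvGetNeg _ i (by omega)]
  simp only [pvPa, pvPo, pvG, pvGr]
  split_ifs <;> simp_all [Prod.ext_iff] <;> omega

lemma solA_mc (grid : List (List Int)) (st : Int × Int × Int) (i : ℕ)
    (hi : i < grid.length / 2) :
    pvA_midcol grid (↑(pvM grid)) st (↑i) =
      (st.1 + pvPa (pvG grid i (pvM grid / 2)) (pvG grid (grid.length - 1 - i) (pvM grid / 2)),
       st.2.1 + pvPo (pvG grid i (pvM grid / 2)) (pvG grid (grid.length - 1 - i) (pvM grid / 2)),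
       st.2.2 + pvPa (pvG grid i (pvM grid / 2)) (pvG grid (grid.length - 1 - i) (pvM grid / 2))) := by
  simp only [pvA_midcol, pvFloorDiv2, pvGetNeg_row grid i (by omega), PySem.List.pyGetD_natCast]
  simp only [pvPa, pvPo, pvG]
  split_ifs <;> simp_all [Prod.ext_iff] <;> omega

lemma pvSumAdd {α : Type} (l : List α) (f g : α → Int) :
    (l.map (fun x => f x + g x)).sum = (l.map f).sum + (l.map g).sum := by
  induction l with
  | nil => simp
  | cons a l ih => simp only [List.map_cons, List.sum_cons, ih]; ring

-- B's per-row-pair totals summed over the sweep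
lemma pvTBa_sum (grid : List (List Int)) :
    ((List.range ((grid.length + 1) / 2)).map (pvTBa grid)).sum =
      pvQsum grid + pvMRa grid + pvMCa grid +
        (if grid.length % 2 = 1 ∧ pvM grid % 2 = 1 then 1 else 0) := by
  by_cases h : grid.length % 2 = 1
  · rw [show (grid.length + 1) / 2 = grid.length / 2 + 1 from by omega,
      List.range_succ, List.map_append, List.sum_append,
      List.map_congr_left (fun x hx => show pvTBa grid x = pvRowQ grid x + pvMCpa grid x from by
        simp only [pvTBa, if_pos (show 2 * x + 1 < grid.length from by
          have := List.mem_range.mp hx; omega)]),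
      pvSumAdd]
    simp only [pvTBa, if_neg (show ¬ 2 * (grid.length / 2) + 1 < grid.length from by omega),
      pvQsum, pvMRa, pvMCa, h, ite_true, true_and, List.map_singleton, List.sum_cons,
      List.sum_nil]
    ring
  · rw [show (grid.length + 1) / 2 = grid.length / 2 from by omega,
      List.map_congr_left (fun x hx => show pvTBa grid x = pvRowQ grid x + pvMCpa grid x from by
        simp only [pvTBa, if_pos (show 2 * x + 1 < grid.length from by
          have := List.mem_range.mp hx; omega)]),
      pvSumAdd]
    simp only [pvQsum, pvMRa, pvMCa, if_neg h, h, false_and, if_false]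
    ring

lemma pvTBo_sum (grid : List (List Int)) :
    ((List.range ((grid.length + 1) / 2)).map (pvTBo grid)).sum = pvMRo grid + pvMCo grid := by
  by_cases h : grid.length % 2 = 1
  · rw [show (grid.length + 1) / 2 = grid.length / 2 + 1 from by omega,
      List.range_succ, List.map_append, List.sum_append,
      List.map_congr_left (fun x hx => show pvTBo grid x = pvMCpo grid x from by
        simp only [pvTBo, if_pos (show 2 * x + 1 < grid.length from by
          have := List.mem_range.mp hx; omega)])]
    simp only [pvTBo, if_neg (show ¬ 2 * (grid.length / 2) + 1 < grid.length from by omega),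
      pvMRo, pvMCo, h, ite_true, List.map_singleton, List.sum_cons, List.sum_nil]
    ring
  · rw [show (grid.length + 1) / 2 = grid.length / 2 from by omega,
      List.map_congr_left (fun x hx => show pvTBo grid x = pvMCpo grid x from by
        simp only [pvTBo, if_pos (show 2 * x + 1 < grid.length from by
          have := List.mem_range.mp hx; omega)])]
    simp only [pvMRo, pvMCo, if_neg h]
    ring

lemma pvTBp_sum (grid : List (List Int)) :
    ((List.range ((grid.length + 1) / 2)).map (pvTBp grid)).sum = pvMRa grid + pvMCa grid := by
  by_cases h : grid.length % 2 = 1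
  · rw [show (grid.length + 1) / 2 = grid.length / 2 + 1 from by omega,
      List.range_succ, List.map_append, List.sum_append,
      List.map_congr_left (fun x hx => show pvTBp grid x = pvMCpa grid x from by
        simp only [pvTBp, if_pos (show 2 * x + 1 < grid.length from by
          have := List.mem_range.mp hx; omega)])]
    simp only [pvTBp, if_neg (show ¬ 2 * (grid.length / 2) + 1 < grid.length from by omega),
      pvMRa, pvMCa, h, ite_true, List.map_singleton, List.sum_cons, List.sum_nil]
    ring
  · rw [show (grid.length + 1) / 2 = grid.length / 2 from by omega,
      List.map_congr_left (fun x hx => show pvTBp grid x = pvMCpa grid x from by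
        simp only [pvTBp, if_pos (show 2 * x + 1 < grid.length from by
          have := List.mem_range.mp hx; omega)])]
    simp only [pvMRa, pvMCa, if_neg h]
    ring

-- eta-bridges: the point-free maps in the canonical sums, written out
lemma pvMap_rowQ (grid : List (List Int)) (l : List ℕ) :
    l.map (pvRowQ grid) = l.map (fun x =>
      ((List.range (pvM grid / 2)).map (fun y => pvAq (pvS grid x y))).sum) := rfl
lemma pvMap_mcpa (grid : List (List Int)) (l : List ℕ) :
    l.map (pvMCpa grid) = l.map (fun i => if pvM grid % 2 = 1 then
      pvPa (pvG grid i (pvM grid / 2)) (pvG grid (grid.length - 1 - i) (pvM grid / 2)) else 0) := rfl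
lemma pvMap_mcpo (grid : List (List Int)) (l : List ℕ) :
    l.map (pvMCpo grid) = l.map (fun i => if pvM grid % 2 = 1 then
      pvPo (pvG grid i (pvM grid / 2)) (pvG grid (grid.length - 1 - i) (pvM grid / 2)) else 0) := rfl

lemma solA (grid : List (List Int)) (hp : Pre_solution grid) :
    solution grid = pvCanon grid := by
  have hlen : ∀ j, j < grid.length →
      (if grid.length % 2 = 1 ∧ j = grid.length / 2 then pvM grid / 2
       else (pvM grid + 1) / 2) ≤ (grid.getD j []).length := by
    intro j hj
    have := pvPreLen grid hp j hj
    split_ifs <;> omega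
  simp only [solution, pvGetD0]
  rw [show (grid.headD []).length = pvM grid from rfl]
  simp only [pvFloorDiv2, pvMod2, pvRange_natCast, List.foldl_map]
  have hquad : ∀ (a : Int) (x : ℕ), x ∈ List.range (grid.length / 2) →
      List.foldl (fun (a2 : Int) (y : ℕ) => pvA_quad grid a2 (↑x) (↑y)) a (List.range (pvM grid / 2)) =
        a + ((List.range (pvM grid / 2)).map (fun y => pvAq (pvS grid x y))).sum := by
    intro a x hx
    have hx' := List.mem_range.mp hx
    have hb1 : pvM grid / 2 ≤ (grid.getD x []).length := by
      have h := hlen x (by omega); rw [if_neg (by omega)] at h; omega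
    have hb2 : pvM grid / 2 ≤ (grid.getD (grid.length - 1 - x) []).length := by
      have h := hlen (grid.length - 1 - x) (by omega); rw [if_neg (by omega)] at h; omega
    exact pvFoldAdd _ _ _ (fun a2 y hy =>
      pvA_quad_eq grid x y hx' hb1 hb2 (List.mem_range.mp hy) a2) a
  rw [pvFoldAdd _ _ _ hquad 0]
  by_cases hodd : grid.length % 2 = 1
  · have hbm : pvM grid / 2 ≤ (grid.getD (grid.length / 2) []).length := by
      have h := hlen (grid.length / 2) (by omega)
      rw [if_pos (by omega)] at h; omega
    rw [if_pos (show ((grid.length % 2 : ℕ) : Int) ≠ 0 from by omega)]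
    rw [pvFoldAdd3 _ _ _ _ _
      (fun st i hi => solA_mr grid hodd hbm st i (List.mem_range.mp hi)) _]
    by_cases hm : pvM grid % 2 = 1
    · rw [if_pos (show ((pvM grid % 2 : ℕ) : Int) ≠ 0 from by omega)]
      rw [pvFoldAdd3 _ _ _ _ _
        (fun st i hi => solA_mc grid st i (List.mem_range.mp hi)) _]
      simp [pvCanon, pvQsum, pvRowQ, pvMRa, pvMRo, pvMCa, pvMCo, pvMira, pvMiro,
        pvMCpa, pvMCpo, pvMap_rowQ, pvMap_mcpa, pvMap_mcpo, hodd, hm] <;>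
        (try split_ifs) <;> (try ring) <;> (try omega) <;> (try (exfalso; omega))
    · rw [if_neg (show ¬ ((pvM grid % 2 : ℕ) : Int) ≠ 0 from by omega)]
      simp [pvCanon, pvQsum, pvRowQ, pvMRa, pvMRo, pvMCa, pvMCo, pvMira, pvMiro,
        pvMCpa, pvMCpo, pvMap_rowQ, pvMap_mcpa, pvMap_mcpo, hodd, hm] <;>
        (try split_ifs) <;> (try ring) <;> (try omega) <;> (try (exfalso; omega))
  · rw [if_neg (show ¬ ((grid.length % 2 : ℕ) : Int) ≠ 0 from by omega)]
    by_cases hm : pvM grid % 2 = 1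
    · rw [if_pos (show ((pvM grid % 2 : ℕ) : Int) ≠ 0 from by omega)]
      rw [pvFoldAdd3 _ _ _ _ _
        (fun st i hi => solA_mc grid st i (List.mem_range.mp hi)) _]
      simp [pvCanon, pvQsum, pvRowQ, pvMRa, pvMRo, pvMCa, pvMCo, pvMira, pvMiro,
        pvMCpa, pvMCpo, pvMap_rowQ, pvMap_mcpa, pvMap_mcpo, hodd, hm] <;>
        (try split_ifs) <;> (try ring) <;> (try omega) <;> (try (exfalso; omega))
    · rw [if_neg (show ¬ ((pvM grid % 2 : ℕ) : Int) ≠ 0 from by omega)]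
      simp [pvCanon, pvQsum, pvRowQ, pvMRa, pvMRo, pvMCa, pvMCo, pvMira, pvMiro,
        pvMCpa, pvMCpo, pvMap_rowQ, pvMap_mcpa, pvMap_mcpo, hodd, hm] <;>
        (try split_ifs) <;> (try ring) <;> (try omega) <;> (try (exfalso; omega))

-- ===== B-side machinery =====

-- orbit keys and per-row (key, value) pairs, Nat-indexed
def pvKx (n x : ℕ) : ℕ := min x (n - 1 - x)
def pvCast (c : ℕ × ℕ) : Int × Int := ((c.1 : Int), (c.2 : Int))
def pvRowPairs (grid : List (List Int)) (x : ℕ) : List ((Int × Int) × Int) :=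
  ((List.range (pvM grid / 2)).flatMap (fun y =>
    [(pvCast (pvKx grid.length x, y), pvG grid x y),
     (pvCast (pvKx grid.length x, y), pvGr grid x y)])) ++
  (if pvM grid % 2 = 1 then
    [(pvCast (pvKx grid.length x, pvM grid / 2), pvG grid x (pvM grid / 2))] else [])
def pvPairs (grid : List (List Int)) : List ((Int × Int) × Int) :=
  (List.range grid.length).flatMap (pvRowPairs grid)
-- the key list one row contributes (Nat level) and the quadrant keys in scan order
def pvRk (C : ℕ) : List ℕ :=
  (List.range (C / 2)).flatMap (fun y => [y, y]) ++ (if C % 2 = 1 then [C / 2] else [])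
def pvQn (R C : ℕ) : List (ℕ × ℕ) :=
  (List.range ((R + 1) / 2)).flatMap (fun i => (List.range ((C + 1) / 2)).map (fun j => (i, j)))
-- closed-form orbit value list of quadrant key (i, j)
def pvOrb (grid : List (List Int)) (i j : ℕ) : List Int :=
  if 2 * i + 1 < grid.length then
    if j < pvM grid / 2 then
      [pvG grid i j, pvGr grid i j,
       pvG grid (grid.length - 1 - i) j, pvGr grid (grid.length - 1 - i) j]
    else [pvG grid i j, pvG grid (grid.length - 1 - i) j]
  else
    if j < pvM grid / 2 then [pvG grid i j, pvGr grid i j]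
    else [pvG grid i j]

-- B's per-orbit contributions
def pvFa (v : List Int) : Int := (pvB_step (0, 0, 0) v).1
def pvFo (v : List Int) : Int := (pvB_step (0, 0, 0) v).2.1
def pvFp (v : List Int) : Int := (pvB_step (0, 0, 0) v).2.2

lemma pvB_step_add (st : Int × Int × Int) (v : List Int) :
    pvB_step st v = (st.1 + pvFa v, st.2.1 + pvFo v, st.2.2 + pvFp v) := by
  simp only [pvB_step, pvFa, pvFo, pvFp]
  split_ifs <;> simp [Prod.ext_iff]

-- Set.ofList commutes with an injective map
lemma pvOfList_concat {α : Type} [BEq α] (xs : List α) (a : α) :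
    PySem.Set.ofList (xs ++ [a]) = PySem.Set.add (PySem.Set.ofList xs) a := by
  rw [PySem.Set.ofList_append, PySem.Set.update_cons, PySem.Set.update_nil]

lemma pvOfList_map {α β : Type} [BEq α] [LawfulBEq α] [BEq β] [LawfulBEq β]
    (f : α → β) (hf : Function.Injective f) (l : List α) :
    PySem.Set.ofList (l.map f) = (PySem.Set.ofList l).map f := by
  induction l using List.reverseRecOn with
  | nil => rfl
  | append_singleton l a ih =>
    rw [List.map_append, List.map_singleton, pvOfList_concat, pvOfList_concat, ih]
    simp only [PySem.Set.add, PySem.Set.contains]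
    by_cases h : a ∈ PySem.Set.ofList l
    · rw [if_pos (by simpa using List.mem_map_of_mem h), if_pos (by simpa using h)]
    · rw [if_neg (by simp [hf.eq_iff]; intro hx; exact h ((PySem.Set.mem_ofList l a).mpr hx)),
        if_neg (by simpa using h), List.map_append, List.map_singleton]

-- filter of a range with an at-most-two-solution predicate
lemma pvFilt0 (n : ℕ) (p : ℕ → Bool) (h : ∀ y, y < n → p y = false) :
    (List.range n).filter p = [] := by
  rw [List.filter_eq_nil_iff]
  intro y hy
  simp [h y (List.mem_range.mp hy)]

lemma pvFilt1 (n a : ℕ) (ha : a < n) (p : ℕ → Bool)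
    (hp : ∀ y, y < n → (p y = true ↔ y = a)) :
    (List.range n).filter p = [a] := by
  induction n with
  | zero => omega
  | succ n ih =>
    rw [List.range_succ, List.filter_append]
    by_cases han : a = n
    · rw [pvFilt0 n p ?_]
      · have hpn : p n = true := (hp n (by omega)).mpr (by omega)
        simp [hpn, han]
      · intro y hy
        have h2 := hp y (by omega)
        by_cases h : p y = true
        · exfalso; have := h2.mp h; omega
        · simpa using h
    · rw [ih (by omega) (fun y hy => hp y (by omega))]
      have hpn : p n = false := by
        have h2 := hp n (by omega)
        by_cases h : p n = true
        · exfalso; have := h2.mp h; omega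
        · simpa using h
      simp [hpn]

lemma pvFilt2 (n a b : ℕ) (hab : a < b) (hb : b < n) (p : ℕ → Bool)
    (hp : ∀ y, y < n → (p y = true ↔ (y = a ∨ y = b))) :
    (List.range n).filter p = [a, b] := by
  induction n with
  | zero => omega
  | succ n ih =>
    rw [List.range_succ, List.filter_append]
    by_cases hbn : b = n
    · rw [pvFilt1 n a (by omega) p ?_]
      · have hpn : p n = true := (hp n (by omega)).mpr (by omega)
        simp [hpn, hbn]
      · intro y hy
        have h2 := hp y (by omega)
        constructor
        · intro h
          rcases h2.mp h with h | h
          · exact h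
          · omega
        · intro h; exact h2.mpr (Or.inl h)
    · rw [ih (by omega) (fun y hy => hp y (by omega))]
      have hpn : p n = false := by
        have h2 := hp n (by omega)
        by_cases h : p n = true
        · exfalso; have := h2.mp h; omega
        · simpa using h
      simp [hpn]

-- flatMap with an if-guard = flatMap over the filtered list
lemma pvFlatMap_guard {α β : Type} (l : List α) (p : α → Bool) (w : α → List β) :
    l.flatMap (fun x => if p x then w x else []) = (l.filter p).flatMap w := by
  induction l with
  | nil => rfl
  | cons x l ih => by_cases h : p x = true <;> simp [List.filter_cons, h, ih]

-- sum over a flatMap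
lemma pvSumFlat {α : Type} (l : List α) (f : α → List Int) :
    ((l.flatMap f).sum) = (l.map (fun x => (f x).sum)).sum := by
  induction l with
  | nil => rfl
  | cons x l ih => simp [List.flatMap_cons, List.sum_append, ih]

-- the mirror filter over a range: the two (or one) row indices sharing key a
lemma pvMirFilt (n a : ℕ) (ha : a < (n + 1) / 2) :
    (List.range n).filter (fun x => decide (pvKx n x = a)) =
      if 2 * a + 1 < n then [a, n - 1 - a] else [a] := by
  by_cases h : 2 * a + 1 < n
  · rw [if_pos h]
    exact pvFilt2 n a (n - 1 - a) (by omega) (by omega) _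
      (fun y hy => by simp only [decide_eq_true_eq, pvKx]; omega)
  · rw [if_neg h]
    exact pvFilt1 n a (by omega) _
      (fun y hy => by simp only [decide_eq_true_eq, pvKx]; omega)

-- appending two values at once is two successive appends
lemma pvModify2 {κ : Type} [BEq κ] [LawfulBEq κ] (d : PySem.Dict κ (List Int)) (k : κ) (a b : Int) :
    d.modify k [] (· ++ [a, b]) = (d.modify k [] (· ++ [a])).modify k [] (· ++ [b]) := by
  simp [PySem.Dict.modify, PySem.Dict.getD_insert_self, PySem.Dict.insert_insert_self]

-- dedup of the duplicated left-half positions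
lemma pvDupSet (n : ℕ) :
    PySem.Set.ofList ((List.range n).flatMap (fun y => [y, y])) = List.range n := by
  induction n with
  | zero => rfl
  | succ n ih =>
    rw [List.range_succ, List.flatMap_append, List.flatMap_singleton, PySem.Set.ofList_append,
      ih, PySem.Set.update_cons, PySem.Set.update_cons, PySem.Set.update_nil]
    have h1 : PySem.Set.add (List.range n) n = List.range n ++ [n] := by
      simp [PySem.Set.add, PySem.Set.contains]
    rw [h1, show List.range n ++ [n] = List.range (n + 1) from List.range_succ.symm]
    simp [PySem.Set.add, PySem.Set.contains, List.mem_range]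

-- dedup of one row's key list
lemma pvRkSet (C : ℕ) : PySem.Set.ofList (pvRk C) = List.range ((C + 1) / 2) := by
  rw [pvRk, PySem.Set.ofList_append, pvDupSet]
  by_cases hm : C % 2 = 1
  · rw [if_pos hm, PySem.Set.update_cons, PySem.Set.update_nil]
    have h1 : PySem.Set.add (List.range (C / 2)) (C / 2) = List.range (C / 2) ++ [C / 2] := by
      simp [PySem.Set.add, PySem.Set.contains]
    rw [h1, show List.range (C / 2) ++ [C / 2] = List.range (C / 2 + 1) from List.range_succ.symm]
    congr 1
    omega
  · rw [if_neg hm, PySem.Set.update_nil]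
    congr 1
    omega

lemma pvRk_lt (C : ℕ) : ∀ b ∈ pvRk C, b < (C + 1) / 2 := by
  intro b hb
  simp only [pvRk, List.mem_append, List.mem_flatMap, List.mem_range, List.mem_cons,
    List.not_mem_nil, or_false] at hb
  rcases hb with ⟨y, hy, hb | hb⟩ | hb
  · omega
  · omega
  · by_cases hm : C % 2 = 1
    · rw [if_pos hm] at hb
      simp only [List.mem_singleton] at hb
      omega
    · rw [if_neg hm] at hb
      simp at hb

-- top rows contribute the quadrant keys in scan order
lemma pvTopSet (R C : ℕ) : ∀ n, n ≤ (R + 1) / 2 →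
    PySem.Set.ofList ((List.range n).flatMap (fun x => (pvRk C).map (Prod.mk (pvKx R x)))) =
      (List.range n).flatMap (fun i => (List.range ((C + 1) / 2)).map (fun j => (i, j))) := by
  intro n
  induction n with
  | zero => intro _; rfl
  | succ n ih =>
    intro hn
    rw [List.range_succ, List.flatMap_append, List.flatMap_singleton,
      PySem.Set.ofList_append, ih (by omega), PySem.Set.update_eq_append_filter]
    have hkx : pvKx R n = n := by simp only [pvKx]; omega
    have hofl : PySem.Set.ofList ((pvRk C).map (Prod.mk (pvKx R n))) =
        (List.range ((C + 1) / 2)).map (Prod.mk n) := by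
      rw [hkx, pvOfList_map (Prod.mk n) (fun a b h => by simpa using h), pvRkSet]
    rw [hofl]
    have hfil : List.filter (fun y => !PySem.Set.contains
        ((List.range n).flatMap (fun i => (List.range ((C + 1) / 2)).map (fun j => (i, j)))) y)
        ((List.range ((C + 1) / 2)).map (Prod.mk n)) = (List.range ((C + 1) / 2)).map (Prod.mk n) := by
      rw [List.filter_eq_self]
      intro b hb
      simp only [List.mem_map, List.mem_range] at hb
      obtain ⟨j, hj, rfl⟩ := hb
      have : (n, j) ∉ (List.range n).flatMap (fun i => (List.range ((C + 1) / 2)).map (fun j => (i, j))) := by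
        simp only [List.mem_flatMap, List.mem_map, List.mem_range]
        rintro ⟨i, hi, j', _, h⟩
        have : i = n := (Prod.mk.injEq _ _ _ _).mp h |>.1
        omega
      simp [PySem.Set.contains_iff, this]
    rw [hfil, List.flatMap_append, List.flatMap_singleton]

-- dedup of all cell keys = quadrant keys in scan order
lemma pvKeySet (R C : ℕ) :
    PySem.Set.ofList ((List.range R).flatMap (fun x => (pvRk C).map (Prod.mk (pvKx R x)))) =
      pvQn R C := by
  have hsplit : List.range R = List.range ((R + 1) / 2) ++ (List.range (R / 2)).map ((R + 1) / 2 + ·) := by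
    rw [← List.range_add]; congr 1; omega
  rw [hsplit, List.flatMap_append, PySem.Set.ofList_append,
    pvTopSet R C ((R + 1) / 2) le_rfl, PySem.Set.update_eq_append_filter]
  have hfil : List.filter (fun y => !PySem.Set.contains
      ((List.range ((R + 1) / 2)).flatMap (fun i => (List.range ((C + 1) / 2)).map (fun j => (i, j)))) y)
      (PySem.Set.ofList (((List.range (R / 2)).map ((R + 1) / 2 + ·)).flatMap
        (fun x => (pvRk C).map (Prod.mk (pvKx R x))))) = [] := by
    rw [List.filter_eq_nil_iff]
    intro b hb
    rw [PySem.Set.mem_ofList] at hb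
    simp only [List.mem_flatMap, List.mem_map, List.mem_range] at hb
    obtain ⟨x, ⟨t, ht, rfl⟩, c2, hc2, rfl⟩ := hb
    have hc2' := pvRk_lt C c2 hc2
    have hmem : (pvKx R ((R + 1) / 2 + t), c2) ∈
        (List.range ((R + 1) / 2)).flatMap (fun i => (List.range ((C + 1) / 2)).map (fun j => (i, j))) := by
      simp only [List.mem_flatMap, List.mem_map, List.mem_range]
      exact ⟨pvKx R ((R + 1) / 2 + t), by simp only [pvKx]; omega, c2, hc2', rfl⟩
    simp [PySem.Set.contains_iff, hmem]
  rw [hfil, List.append_nil]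
  rfl

lemma pvCast_inj : Function.Injective pvCast := by
  intro a b h
  simp only [pvCast, Prod.mk.injEq, Int.natCast_inj] at h
  exact Prod.ext h.1 h.2

-- the keys of B's pairs, at the Nat level
lemma pvPairs_fst (grid : List (List Int)) :
    (pvPairs grid).map Prod.fst =
      ((List.range grid.length).flatMap
        (fun x => (pvRk (pvM grid)).map (Prod.mk (pvKx grid.length x)))).map pvCast := by
  simp only [pvPairs, List.map_flatMap]
  apply List.flatMap_congr
  intro x hx
  simp only [pvRowPairs, pvRk, List.map_append, List.map_flatMap, List.map_map]
  congr 1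
  by_cases hm : pvM grid % 2 = 1 <;> simp [hm]

-- the dict built by B, as a fold over the (key, value) pairs of all grouped cells
lemma pvBuild_eq (grid : List (List Int)) (hp : Pre_solution grid) :
    pvB_build grid (grid.length : Int) ((pvM grid : ℕ) : Int) =
      (pvPairs grid).foldl (fun d p => d.modify p.1 [] (· ++ [p.2])) PySem.Dict.empty := by
  simp only [pvB_build, pvRange_natCast, List.foldl_map, pvPairs, List.foldl_flatMap,
    pvFloorDiv2, pvMod2]
  apply PySem.List.foldl_congr_mem
  intro d x hx
  have hxR : x < grid.length := List.mem_range.mp hx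
  have hlen : (pvM grid + 1) / 2 ≤ (grid.getD x []).length := pvPreLen grid hp x hxR
  have hkx : min (x : Int) ((grid.length : Int) - 1 - (x : Int)) = ((pvKx grid.length x : ℕ) : Int) := by
    simp only [pvKx]
    omega
  simp only [PySem.List.pyGetD_natCast, hkx, pvRange_natCast, List.foldl_map]
  rw [pvRowPairs, List.foldl_append, List.foldl_flatMap]
  have hinner : ∀ st : PySem.Dict (Int × Int) (List Int),
      List.foldl (fun d2 (y : ℕ) =>
        d2.modify (((pvKx grid.length x : ℕ) : Int), (y : Int)) []
          (· ++ [(grid.getD x []).getD y 0,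
                 PySem.List.pyGetD (grid.getD x []) (-(y : Int) - 1) 0]))
        st (List.range (pvM grid / 2)) =
      List.foldl (fun d2 (y : ℕ) =>
        List.foldl (fun d3 p => d3.modify p.1 [] (· ++ [p.2]))
          d2 [(pvCast (pvKx grid.length x, y), pvG grid x y),
              (pvCast (pvKx grid.length x, y), pvGr grid x y)])
        st (List.range (pvM grid / 2)) := by
    intro st
    apply PySem.List.foldl_congr_mem
    intro d2 y hy
    have hyl : y < (grid.getD x []).length := by
      have := List.mem_range.mp hy
      omega
    simp only [List.foldl_cons, List.foldl_nil]
    rw [pvGetNeg _ y hyl, ← pvModify2]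
    rfl
  rw [hinner]
  by_cases hm : pvM grid % 2 = 1
  · rw [if_pos (show ((pvM grid % 2 : ℕ) : Int) ≠ 0 from by omega), if_pos hm]
    simp only [List.foldl_cons, List.foldl_nil, PySem.List.pyGetD_natCast]
    rfl
  · rw [if_neg (show ¬ ((pvM grid % 2 : ℕ) : Int) ≠ 0 from by omega), if_neg hm]
    rfl

-- beq of cast keys
lemma pvKeyBeq (i j : ℕ) (c : ℕ × ℕ) :
    (pvCast c == pvCast (i, j)) = (decide (c.1 = i) && decide (c.2 = j)) := by
  rw [Bool.eq_iff_iff, beq_iff_eq, Bool.and_eq_true]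
  simp [pvCast, Prod.ext_iff]

-- the matching pairs one row contributes to orbit (i, j)
def pvEE (grid : List (List Int)) (i j x : ℕ) : List ((Int × Int) × Int) :=
  (if j < pvM grid / 2 then
    [(pvCast (i, j), pvG grid x j), (pvCast (i, j), pvGr grid x j)] else []) ++
  (if pvM grid % 2 = 1 ∧ j = pvM grid / 2 then
    [(pvCast (i, j), pvG grid x (pvM grid / 2))] else [])

-- closed form of each orbit's value list
lemma pvVals_eq (grid : List (List Int)) (i j : ℕ)
    (hi : i < (grid.length + 1) / 2) (hj : j < (pvM grid + 1) / 2) :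
    (List.map (fun x => x.2)
      (List.filter (fun p => p.1 == pvCast (i, j)) (pvPairs grid))) = pvOrb grid i j := by
  have hitem : ∀ (x y : ℕ) (a b : Int), List.filter (fun p => p.1 == pvCast (i, j))
      [(pvCast (pvKx grid.length x, y), a), (pvCast (pvKx grid.length x, y), b)] =
      if pvKx grid.length x = i ∧ y = j then
        [(pvCast (i, j), a), (pvCast (i, j), b)] else [] := by
    intro x y a b
    simp only [List.filter_cons, List.filter_nil, pvKeyBeq]
    by_cases h1 : pvKx grid.length x = i <;> by_cases h2 : y = j <;> simp [h1, h2]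
  have hrow : ∀ x, (pvRowPairs grid x).filter (fun p => p.1 == pvCast (i, j)) =
      if decide (pvKx grid.length x = i) then pvEE grid i j x else [] := by
    intro x
    rw [pvRowPairs, List.filter_append, List.filter_flatMap]
    by_cases hkx : pvKx grid.length x = i
    · rw [if_pos (show decide (pvKx grid.length x = i) = true from by simp [hkx]), pvEE]
      congr 1
      · rw [List.flatMap_congr (fun y _ => hitem x y (pvG grid x y) (pvGr grid x y))]
        have hg : ∀ y ∈ List.range (pvM grid / 2),
            (if pvKx grid.length x = i ∧ y = j then
              [(pvCast (i, j), pvG grid x y), (pvCast (i, j), pvGr grid x y)] else []) =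
            (if decide (y = j) then
              [(pvCast (i, j), pvG grid x y), (pvCast (i, j), pvGr grid x y)] else []) := by
          intro y _
          by_cases h2 : y = j <;> simp [hkx, h2]
        rw [List.flatMap_congr hg, pvFlatMap_guard]
        by_cases hj2 : j < pvM grid / 2
        · rw [pvFilt1 _ j hj2 (fun y => decide (y = j)) (fun y _ => by simp),
            List.flatMap_singleton, if_pos hj2]
        · rw [pvFilt0 _ (fun y => decide (y = j)) (fun y hy => by simp; omega),
            if_neg hj2, List.flatMap_nil]
      · by_cases hm : pvM grid % 2 = 1
        · rw [if_pos hm]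
          by_cases hj3 : j = pvM grid / 2
          · rw [if_pos ⟨hm, hj3⟩]
            simp only [List.filter_cons, List.filter_nil, pvKeyBeq]
            simp [hkx, hj3]
          · rw [if_neg (show ¬ (pvM grid % 2 = 1 ∧ j = pvM grid / 2) from by tauto)]
            simp only [List.filter_cons, List.filter_nil, pvKeyBeq]
            have h4 : ¬ (pvM grid / 2 = j) := by omega
            simp [hkx, h4]
        · rw [if_neg hm, if_neg (show ¬ (pvM grid % 2 = 1 ∧ j = pvM grid / 2) from by tauto)]
          rfl
    · rw [if_neg (show ¬ (decide (pvKx grid.length x = i) = true) from by simp [hkx])]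
      have hg0 : ∀ y ∈ List.range (pvM grid / 2),
          List.filter (fun p => p.1 == pvCast (i, j))
            [(pvCast (pvKx grid.length x, y), pvG grid x y),
             (pvCast (pvKx grid.length x, y), pvGr grid x y)] =
            ([] : List ((Int × Int) × Int)) := by
        intro y _
        rw [hitem, if_neg (show ¬ (pvKx grid.length x = i ∧ y = j) from by tauto)]
      rw [List.flatMap_congr hg0]
      have hmid : List.filter (fun p => p.1 == pvCast (i, j))
          (if pvM grid % 2 = 1 then
            [(pvCast (pvKx grid.length x, pvM grid / 2), pvG grid x (pvM grid / 2))] else []) =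
          [] := by
        by_cases hm : pvM grid % 2 = 1
        · rw [if_pos hm]
          simp only [List.filter_cons, List.filter_nil, pvKeyBeq]
          simp [hkx]
        · rw [if_neg hm]
          rfl
      rw [hmid]
      simp
  rw [pvPairs, List.filter_flatMap, List.flatMap_congr (fun x _ => hrow x), pvFlatMap_guard,
    pvMirFilt _ _ hi]
  by_cases h1 : 2 * i + 1 < grid.length
  · rw [if_pos h1]
    by_cases hj2 : j < pvM grid / 2
    · have hne : ¬ (pvM grid % 2 = 1 ∧ j = pvM grid / 2) := by omega
      simp [pvEE, hj2, hne, pvOrb, h1]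
    · have hc : pvM grid % 2 = 1 ∧ j = pvM grid / 2 := by omega
      simp [pvEE, hj2, hc, pvOrb, h1, hc.2]
  · rw [if_neg h1]
    by_cases hj2 : j < pvM grid / 2
    · have hne : ¬ (pvM grid % 2 = 1 ∧ j = pvM grid / 2) := by omega
      simp [pvEE, hj2, hne, pvOrb, h1]
    · have hc : pvM grid % 2 = 1 ∧ j = pvM grid / 2 := by omega
      simp [pvEE, hj2, hc, pvOrb, h1, hc.2]

-- B's step on each orbit shape
lemma pvF_quad (a b c d : Int) :
    pvFa [a, b, c, d] = pvAq (a + b + c + d) ∧ pvFo [a, b, c, d] = 0 ∧ pvFp [a, b, c, d] = 0 := by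
  simp only [pvFa, pvFo, pvFp, pvB_step, pvAq]
  norm_num
  split_ifs <;> simp_all <;> omega

lemma pvF_pair (a b : Int) :
    pvFa [a, b] = pvPa a b ∧ pvFo [a, b] = pvPo a b ∧ pvFp [a, b] = pvPa a b := by
  simp only [pvFa, pvFo, pvFp, pvB_step, pvPa, pvPo, PySem.List.pyGetD]
  norm_num
  split_ifs <;> simp_all

lemma pvF_one (a : Int) : pvFa [a] = 1 ∧ pvFo [a] = 0 ∧ pvFp [a] = 0 := by
  simp only [pvFa, pvFo, pvFp, pvB_step]
  norm_num

-- per-quadrant-row totals of B's orbit pass match pvTB*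
lemma pvRowTotals (grid : List (List Int)) (i : ℕ)
    (hi : i < (grid.length + 1) / 2) :
    ((List.range ((pvM grid + 1) / 2)).map (fun j => pvFa (pvOrb grid i j))).sum = pvTBa grid i ∧
    ((List.range ((pvM grid + 1) / 2)).map (fun j => pvFo (pvOrb grid i j))).sum = pvTBo grid i ∧
    ((List.range ((pvM grid + 1) / 2)).map (fun j => pvFp (pvOrb grid i j))).sum = pvTBp grid i := by
  by_cases h1 : 2 * i + 1 < grid.length
  · have hquad : ∀ j ∈ List.range (pvM grid / 2),
        (pvFa (pvOrb grid i j) = pvAq (pvS grid i j) ∧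
         pvFo (pvOrb grid i j) = 0 ∧ pvFp (pvOrb grid i j) = 0) := by
      intro j hj
      have hj' := List.mem_range.mp hj
      rw [pvOrb, if_pos h1, if_pos hj']
      have hq := pvF_quad (pvG grid i j) (pvGr grid i j)
        (pvG grid (grid.length - 1 - i) j) (pvGr grid (grid.length - 1 - i) j)
      exact ⟨by rw [hq.1]; rfl, hq.2.1, hq.2.2⟩
    by_cases hm : pvM grid % 2 = 1
    · have hmid : pvOrb grid i (pvM grid / 2) =
          [pvG grid i (pvM grid / 2), pvG grid (grid.length - 1 - i) (pvM grid / 2)] := by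
        rw [pvOrb, if_pos h1, if_neg (lt_irrefl _)]
      rw [show (pvM grid + 1) / 2 = pvM grid / 2 + 1 from by omega]
      refine ⟨?_, ?_, ?_⟩ <;>
        rw [List.range_succ, List.map_append, List.sum_append, List.map_singleton, hmid,
          List.sum_cons, List.sum_nil]
      · rw [List.map_congr_left (fun j hj => (hquad j hj).1),
          (pvF_pair _ _).1, pvTBa, if_pos h1, pvRowQ, pvMCpa, if_pos hm]
        ring
      · rw [List.map_congr_left (fun j hj => (hquad j hj).2.1),
          (pvF_pair _ _).2.1, pvTBo, if_pos h1, pvMCpo, if_pos hm]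
        simp
      · rw [List.map_congr_left (fun j hj => (hquad j hj).2.2),
          (pvF_pair _ _).2.2, pvTBp, if_pos h1, pvMCpa, if_pos hm]
        simp
    · rw [show (pvM grid + 1) / 2 = pvM grid / 2 from by omega]
      refine ⟨?_, ?_, ?_⟩
      · rw [List.map_congr_left (fun j hj => (hquad j hj).1),
          pvTBa, if_pos h1, pvRowQ, pvMCpa, if_neg hm]
        ring
      · rw [List.map_congr_left (fun j hj => (hquad j hj).2.1),
          pvTBo, if_pos h1, pvMCpo, if_neg hm]
        simp
      · rw [List.map_congr_left (fun j hj => (hquad j hj).2.2),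
          pvTBp, if_pos h1, pvMCpa, if_neg hm]
        simp
  · have hpair : ∀ j ∈ List.range (pvM grid / 2),
        (pvFa (pvOrb grid i j) = pvPa (pvG grid i j) (pvGr grid i j) ∧
         pvFo (pvOrb grid i j) = pvPo (pvG grid i j) (pvGr grid i j) ∧
         pvFp (pvOrb grid i j) = pvPa (pvG grid i j) (pvGr grid i j)) := by
      intro j hj
      have hj' := List.mem_range.mp hj
      rw [pvOrb, if_neg h1, if_pos hj']
      exact pvF_pair _ _
    by_cases hm : pvM grid % 2 = 1
    · have hmid : pvOrb grid i (pvM grid / 2) = [pvG grid i (pvM grid / 2)] := by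
        rw [pvOrb, if_neg h1, if_neg (lt_irrefl _)]
      rw [show (pvM grid + 1) / 2 = pvM grid / 2 + 1 from by omega]
      refine ⟨?_, ?_, ?_⟩ <;>
        rw [List.range_succ, List.map_append, List.sum_append, List.map_singleton, hmid,
          List.sum_cons, List.sum_nil]
      · rw [List.map_congr_left (fun j hj => (hpair j hj).1),
          (pvF_one _).1, pvTBa, if_neg h1, pvMira, if_pos hm]
        ring
      · rw [List.map_congr_left (fun j hj => (hpair j hj).2.1),
          (pvF_one _).2.1, pvTBo, if_neg h1, pvMiro]
        simp
      · rw [List.map_congr_left (fun j hj => (hpair j hj).2.2),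
          (pvF_one _).2.2, pvTBp, if_neg h1, pvMira]
        simp
    · rw [show (pvM grid + 1) / 2 = pvM grid / 2 from by omega]
      refine ⟨?_, ?_, ?_⟩
      · rw [List.map_congr_left (fun j hj => (hpair j hj).1),
          pvTBa, if_neg h1, pvMira, if_neg hm]
        simp
      · rw [List.map_congr_left (fun j hj => (hpair j hj).2.1),
          pvTBo, if_neg h1, pvMiro]
      · rw [List.map_congr_left (fun j hj => (hpair j hj).2.2),
          pvTBp, if_neg h1, pvMira]

lemma solB (grid : List (List Int)) (hp : Pre_solution grid) :
    solution_alt grid = pvCanon grid := by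
  have hnodup : ((pvPairs grid).foldl (fun d p => d.modify p.1 [] (· ++ [p.2]))
      PySem.Dict.empty).keys.Nodup :=
    PySem.Dict.nodup_keys_foldl_modify_key _ _ _ _ _ (by simp [PySem.Dict.keys_empty])
  have hkeys : ((pvPairs grid).foldl (fun d p => d.modify p.1 [] (· ++ [p.2]))
      PySem.Dict.empty).keys = (pvQn grid.length (pvM grid)).map pvCast := by
    rw [PySem.Dict.keys_foldl_modify_key, PySem.Dict.keys_empty, PySem.Set.update_nil_left,
      pvPairs_fst, pvOfList_map pvCast pvCast_inj, pvKeySet]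
  have hvals : ∀ c ∈ pvQn grid.length (pvM grid),
      ((pvPairs grid).foldl (fun d p => d.modify p.1 [] (· ++ [p.2]))
        PySem.Dict.empty).getD (pvCast c) [] = pvOrb grid c.1 c.2 := by
    rintro ⟨i, j⟩ hc
    have hb : i < (grid.length + 1) / 2 ∧ j < (pvM grid + 1) / 2 := by
      simp only [pvQn, List.mem_flatMap, List.mem_map, List.mem_range] at hc
      obtain ⟨i', hi', j', hj', h⟩ := hc
      cases h
      exact ⟨hi', hj'⟩
    rw [PySem.Dict.getD_foldl_modify_append, PySem.Dict.getD_empty, List.nil_append]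
    exact pvVals_eq grid i j hb.1 hb.2
  have hv : ((pvPairs grid).foldl (fun d p => d.modify p.1 [] (· ++ [p.2]))
      PySem.Dict.empty).values =
      (pvQn grid.length (pvM grid)).map (fun c => pvOrb grid c.1 c.2) := by
    rw [PySem.Dict.values_eq_map_keys _ hnodup [], hkeys, List.map_map]
    exact List.map_congr_left (fun c hc => hvals c hc)
  have hsum : ∀ F : List Int → Int,
      ((pvQn grid.length (pvM grid)).map (fun c => F (pvOrb grid c.1 c.2))).sum =
      ((List.range ((grid.length + 1) / 2)).map (fun i =>
        ((List.range ((pvM grid + 1) / 2)).map (fun j => F (pvOrb grid i j))).sum)).sum := by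
    intro F
    rw [pvQn, List.map_flatMap, pvSumFlat]
    simp only [List.map_map, Function.comp_def]
  simp only [solution_alt, pvGetD0]
  rw [show ((grid.headD []).length : Int) = ((pvM grid : ℕ) : Int) from rfl,
    pvBuild_eq grid hp, hv, List.foldl_map,
    pvFoldAdd3 _ _ (fun c => pvFa (pvOrb grid c.1 c.2)) (fun c => pvFo (pvOrb grid c.1 c.2))
      (fun c => pvFp (pvOrb grid c.1 c.2)) (fun s c _ => pvB_step_add s _) (0, 0, 0)]
  have ha : ((pvQn grid.length (pvM grid)).map (fun c => pvFa (pvOrb grid c.1 c.2))).sum =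
      pvQsum grid + pvMRa grid + pvMCa grid +
        (if grid.length % 2 = 1 ∧ pvM grid % 2 = 1 then 1 else 0) := by
    rw [hsum, List.map_congr_left (fun i hi =>
      (pvRowTotals grid i (List.mem_range.mp hi)).1), pvTBa_sum]
  have ho : ((pvQn grid.length (pvM grid)).map (fun c => pvFo (pvOrb grid c.1 c.2))).sum =
      pvMRo grid + pvMCo grid := by
    rw [hsum, List.map_congr_left (fun i hi =>
      (pvRowTotals grid i (List.mem_range.mp hi)).2.1), pvTBo_sum]
  have hq : ((pvQn grid.length (pvM grid)).map (fun c => pvFp (pvOrb grid c.1 c.2))).sum =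
      pvMRa grid + pvMCa grid := by
    rw [hsum, List.map_congr_left (fun i hi =>
      (pvRowTotals grid i (List.mem_range.mp hi)).2.2), pvTBp_sum]
  rw [ha, ho, hq, pvCanon]
  simp only [zero_add]

-- ===== VERDICT (by name: the statement is the Claim_ definition above) =====
theorem solution_spec : Claim_equal_solution := by
  intro grid _ hp
  unfold Spec_solution
  rw [solA grid hp, solB grid hp]
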